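-- pv_equiv track=rewrite | github.com/ahoho/uncertainty-modeling | annotation.py | create_annotator_mapping
-- ===== SOURCE A (Python) =====
-- from collections import defaultdict
-- from typing import Dict, List, Optional, Tuple
--
-- def create_annotator_mapping(data: List[dict]) -> Dict[Tuple[int, int], int]:
--     """
--     Create a consistent mapping from (annotator_id, position) to matrix position.
--     This is used to ensure consistent indexing across train and test sets.
--
--     Parameters:
--     -----------
--     data : List[dict]
--         The full dataset before splitting
--
--     Returns:
--     --------
--     Dict[Tuple[int, int], int]: Mapping from (annotator_id, position) to matrix position
--     """
--     # First pass: collect all annotator-position combinations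
--     annotator_positions = defaultdict(set)  # annotator_id -> set of positions they appear in
--
--     for item in data:
--         annotators = item['annotators']
--         for pos, ann in enumerate(annotators):
--             annotator_positions[ann].add(pos)
--
--     # Create consistent position mapping for each annotator
--     annotator_to_positions: Dict[Tuple[int, int], int] = {}
--     current_position = 0
--
--     # Sort annotators for deterministic output
--     for annotator in sorted(annotator_positions.keys()):
--         positions = sorted(annotator_positions[annotator])
--         for pos in positions:
--             annotator_to_positions[(annotator, pos)] = current_position
--             current_position += 1
--
--     return annotator_to_positions
-- ===== SOURCE B (Python) =====
-- def create_annotator_mapping(data):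
--     """Flat version: one deduplicated set of (annotator, position) pairs,
--     then a single sorted-enumerate pass (lexicographic tuple order
--     reproduces the annotator-then-position order)."""
--     pairs = set()
--     for item in data:
--         for pos, ann in enumerate(item['annotators']):
--             pairs.add((ann, pos))
--     return {key: idx for idx, key in enumerate(sorted(pairs))}
-- ===== Notes on version B (the rewrite author's own statement) =====
-- stated objective: simpler
-- what changed: Replaces the defaultdict(set) grouped by annotator plus the nested sort-annotators/sort-positions loop with one flat deduplicated set of (annotator, position) pairs and a single sorted-enumerate comprehension, relying on lexicographic tuple order.
import Mathlib
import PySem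

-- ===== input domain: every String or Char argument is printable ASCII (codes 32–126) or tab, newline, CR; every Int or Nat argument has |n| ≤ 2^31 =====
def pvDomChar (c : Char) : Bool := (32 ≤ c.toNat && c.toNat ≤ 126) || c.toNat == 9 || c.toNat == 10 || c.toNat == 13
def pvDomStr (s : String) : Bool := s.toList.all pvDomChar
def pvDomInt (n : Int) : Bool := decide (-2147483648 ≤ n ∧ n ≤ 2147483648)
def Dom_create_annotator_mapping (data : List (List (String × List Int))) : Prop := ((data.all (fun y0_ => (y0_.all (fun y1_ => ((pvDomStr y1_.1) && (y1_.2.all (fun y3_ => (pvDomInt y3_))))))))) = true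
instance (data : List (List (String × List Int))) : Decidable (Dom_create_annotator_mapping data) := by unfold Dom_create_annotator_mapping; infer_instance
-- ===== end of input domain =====

-- B replaces A's per-annotator defaultdict(set) plus nested sorted loops by one flat
-- deduplicated set of (annotator, position) pairs and a single sorted-enumerate pass
-- (objective: simpler).

-- ===== PORT A =====
-- item['annotators'] : first-match association-list lookup; the '.getD []' branch is
-- only reached outside Pre_ (where Python raises KeyError).
def create_annotator_mapping (data : List (List (String × List Int))) : List (Int × Int × Int) :=
  -- first pass: annotator_positions : defaultdict(set), annotator -> set of positions
  let ap : PySem.Dict Int (PySem.Set Int) :=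
    data.foldl (fun ap item =>
      let annotators := ((PySem.Dict.mk item).get? "annotators").getD []
      (PySem.List.enumerate annotators 0).foldl
        (fun ap pa => ap.modify pa.2 PySem.Set.empty (fun s => PySem.Set.add s pa.1)) ap)
      PySem.Dict.empty
  -- second pass: for annotator in sorted(keys): for pos in sorted(positions): append, count
  ((PySem.List.sorted ap.keys (fun x => x) false).foldl (fun st ann =>
      let positions := PySem.List.sorted (ap.getD ann PySem.Set.empty) (fun x => x) false
      positions.foldl (fun st pos => (st.1 ++ [(ann, pos, st.2)], st.2 + 1)) st)
    (([] : List (Int × Int × Int)), (0 : Int))).1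

-- ===== PORT B =====
def create_annotator_mapping_alt (data : List (List (String × List Int))) : List (Int × Int × Int) :=
  let pairs : PySem.Set (Int × Int) :=
    data.foldl (fun pr item =>
      let annotators := ((PySem.Dict.mk item).get? "annotators").getD []
      (PySem.List.enumerate annotators 0).foldl
        (fun pr pa => PySem.Set.add pr (pa.2, pa.1)) pr)
      PySem.Set.empty
  (PySem.List.enumerate (PySem.List.sorted2 pairs (fun q => q.1) (fun q => q.2) false) 0).map
    (fun p => (p.2.1, p.2.2, p.1))

-- ===== PRECONDITION & SPEC =====
-- Pre_ excludes exactly the inputs where Python's item['annotators'] raises KeyError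
-- (both A and B raise there).
def Pre_create_annotator_mapping (data : List (List (String × List Int))) : Prop :=
  (data.all (fun item => (PySem.Dict.mk item).contains "annotators")) = true
instance (data : List (List (String × List Int))) : Decidable (Pre_create_annotator_mapping data) := by
  unfold Pre_create_annotator_mapping; infer_instance
def pvWitness_create_annotator_mapping : (List (List (String × List Int))) :=
  [[("annotators", [3, 1, 3])], [("annotators", [2])]]

def Spec_create_annotator_mapping (data : List (List (String × List Int))) (out : List (Int × Int × Int)) : Prop := out = create_annotator_mapping_alt data
instance (data : List (List (String × List Int))) (out : List (Int × Int × Int)) : Decidable (Spec_create_annotator_mapping data out) := by unfold Spec_create_annotator_mapping; infer_instance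

-- ===== CLAIM (what is proved, stated in full; the proofs are below) =====
def Claim_equal_create_annotator_mapping : Prop := ∀ (data : List (List (String × List Int))), Dom_create_annotator_mapping data → Pre_create_annotator_mapping data → Spec_create_annotator_mapping data (create_annotator_mapping data)

-- ===== LEMMAS AND PROOFS =====

-- the flattened stream of (annotator, position) pairs, in traversal order
def pvPairsOf (data : List (List (String × List Int))) : List (Int × Int) :=
  data.flatMap (fun item =>
    (PySem.List.enumerate (((PySem.Dict.mk item).get? "annotators").getD []) 0).map
      (fun pa => (pa.2, pa.1)))

-- A's first pass is the modify-fold over the flattened pair stream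
theorem pvA_first (data : List (List (String × List Int))) :
    data.foldl (fun ap item =>
      (PySem.List.enumerate (((PySem.Dict.mk item).get? "annotators").getD []) 0).foldl
        (fun ap pa => ap.modify pa.2 PySem.Set.empty (fun s => PySem.Set.add s pa.1)) ap)
      PySem.Dict.empty
    = (pvPairsOf data).foldl
        (fun d q => d.modify q.1 PySem.Set.empty (fun s => PySem.Set.add s q.2))
        PySem.Dict.empty := by
  simp only [pvPairsOf, List.foldl_flatMap, List.foldl_map]

-- B's first pass is set(flattened pair stream)
theorem pvB_first (data : List (List (String × List Int))) :
    data.foldl (fun pr item =>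
      (PySem.List.enumerate (((PySem.Dict.mk item).get? "annotators").getD []) 0).foldl
        (fun pr pa => PySem.Set.add pr (pa.2, pa.1)) pr)
      PySem.Set.empty
    = PySem.Set.ofList (pvPairsOf data) := by
  simp only [pvPairsOf, PySem.Set.ofList, List.foldl_flatMap, List.foldl_map]

-- membership bridge: p is in the snd-image of the a-group of pr iff (a, p) ∈ pr
theorem pv_mem_group (pr : List (Int × Int)) (a p : Int) :
    p ∈ (pr.filter (fun q => q.1 == a)).map (fun q => q.2) ↔ (a, p) ∈ pr := by
  simp only [List.mem_map, List.mem_filter, beq_iff_eq]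
  constructor
  · rintro ⟨⟨q1, q2⟩, ⟨hq, rfl⟩, rfl⟩; exact hq
  · intro h; exact ⟨(a, p), ⟨h, rfl⟩, rfl⟩

-- invariant tying A's defaultdict(set) to B's flat set along the pair stream
theorem pvInv (L : List (Int × Int)) :
    ∀ (d : PySem.Dict Int (PySem.Set Int)) (pr : PySem.Set (Int × Int)),
      (∀ b : Int, d.getD b PySem.Set.empty = (pr.filter (fun q => q.1 == b)).map (fun q => q.2)) →
      ∀ a : Int,
        (L.foldl (fun d q => d.modify q.1 PySem.Set.empty (fun s => PySem.Set.add s q.2)) d).getD a PySem.Set.empty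
          = ((L.foldl PySem.Set.add pr).filter (fun q => q.1 == a)).map (fun q => q.2) := by
  induction L with
  | nil => intro d pr h a; simpa using h a
  | cons q L ih =>
    intro d pr h a
    simp only [List.foldl_cons]
    apply ih
    intro b
    rw [PySem.Dict.getD_modify]
    by_cases hb : b = q.1
    · subst hb
      rw [if_pos rfl, h q.1]
      by_cases hq : q ∈ pr
      · have h2 : q.2 ∈ (pr.filter (fun r => r.1 == q.1)).map (fun r => r.2) :=
          (pv_mem_group pr q.1 q.2).mpr hq
        simp [PySem.Set.add, PySem.Set.contains, hq, h2]
      · have h2 : q.2 ∉ (pr.filter (fun r => r.1 == q.1)).map (fun r => r.2) := fun hc =>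
          hq ((pv_mem_group pr q.1 q.2).mp hc)
        simp [PySem.Set.add, PySem.Set.contains, hq, h2, List.filter_append]
    · have hqb : ¬ q.1 = b := fun h' => hb h'.symm
      rw [if_neg hb, h b]
      by_cases hq : q ∈ pr
      · simp [PySem.Set.add, PySem.Set.contains, hq]
      · simp [PySem.Set.add, PySem.Set.contains, hq, List.filter_append, hqb]

-- A's dict keys are the distinct annotators of the stream, in first-appearance order
theorem pvKeys (L : List (Int × Int)) :
    (L.foldl (fun d q => d.modify q.1 PySem.Set.empty (fun s => PySem.Set.add s q.2)) PySem.Dict.empty).keys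
      = PySem.Set.ofList (L.map (fun q => q.1)) := by
  rw [PySem.Dict.keys_foldl_modify_key L (fun q => q.1) PySem.Set.empty (fun _ q s => PySem.Set.add s q.2)]
  simp [PySem.Dict.keys_empty, PySem.Set.update, PySem.Set.ofList]

-- each snd-image group of a duplicate-free pair list is duplicate-free
theorem pvNodupGroup (pr : List (Int × Int)) (hnd : pr.Nodup) (a : Int) :
    ((pr.filter (fun q => q.1 == a)).map (fun q => q.2)).Nodup := by
  refine (hnd.filter _).map_on ?_
  intro x hx y hy hxy
  have hx1 : x.1 = a := by simpa using (List.of_mem_filter hx)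
  have hy1 : y.1 = a := by simpa using (List.of_mem_filter hy)
  exact Prod.ext (hx1.trans hy1.symm) hxy

-- sorting a duplicate-free Int list is strictly increasing
theorem pvSortedLt (s : List Int) (h : s.Nodup) :
    (PySem.List.sorted s (fun x => x) false).Pairwise (· < ·) := by
  have h1 := PySem.List.sorted_pairwise (xs := s) (key := fun x => x)
  have h2 : (PySem.List.sorted s (fun x => x) false).Nodup :=
    ((PySem.List.sorted_perm s (fun x => x) false).symm).nodup h
  exact (h1.and h2).imp (fun hp => lt_of_le_of_ne hp.1 hp.2)

-- flatMap respects per-element permutations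
theorem pvFlatMapPerm (ks : List Int) (f g : Int → List (Int × Int))
    (h : ∀ a ∈ ks, (f a).Perm (g a)) : (ks.flatMap f).Perm (ks.flatMap g) := by
  induction ks with
  | nil => simp
  | cons a ks ih =>
    simp only [List.flatMap_cons]
    exact (h a (by simp)).append (ih (fun b hb => h b (by simp [hb])))

-- regrouping a pair list by a duplicate-free covering key list is a permutation
theorem pvGroupPerm (ks : List Int) (hnd : ks.Nodup) :
    ∀ (l : List (Int × Int)), (∀ q ∈ l, q.1 ∈ ks) →
      (ks.flatMap (fun a => l.filter (fun q => q.1 == a))).Perm l := by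
  induction ks with
  | nil =>
    intro l hcov
    have : l = [] := List.eq_nil_iff_forall_not_mem.mpr (fun q hq => by simpa using hcov q hq)
    simp [this]
  | cons a ks ih =>
    intro l hcov
    have hna : a ∉ ks := (List.nodup_cons.mp hnd).1
    have hnd' : ks.Nodup := (List.nodup_cons.mp hnd).2
    simp only [List.flatMap_cons]
    have hcov' : ∀ q ∈ l.filter (fun q => !(q.1 == a)), q.1 ∈ ks := by
      intro q hq
      have h1 := List.of_mem_filter hq
      have h2 := List.mem_of_mem_filter hq
      rcases List.mem_cons.mp (hcov q h2) with h | h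
      · exact absurd (by simpa using h1) (by simp [h])
      · exact h
    have hsame : ks.flatMap (fun b => l.filter (fun q => q.1 == b))
        = ks.flatMap (fun b => (l.filter (fun q => !(q.1 == a))).filter (fun q => q.1 == b)) := by
      refine List.flatMap_congr ?_
      intro b hb
      have hba : b ≠ a := fun h => hna (h ▸ hb)
      rw [List.filter_filter]
      refine List.filter_congr ?_
      intro q _
      by_cases hqb : q.1 = b
      · simp [hqb, hba]
      · simp [hqb]
    refine List.Perm.trans ?_ (List.filter_append_perm (fun q => q.1 == a) l)
    refine List.Perm.append_left _ ?_
    rw [hsame]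
    exact ih hnd' _ hcov'

-- Python's tuple sort is the sort by the lexicographic key
theorem pv_sorted2_eq (xs : List (Int × Int)) :
    PySem.List.sorted2 xs (fun q => q.1) (fun q => q.2) false
      = PySem.List.sorted xs (fun q => (toLex (q.1, q.2) : Lex (Int × Int))) false := by
  rw [PySem.List.sorted_eq_foldl_insertBy]
  have hfun : (fun (a b : Int × Int) => decide (a.1 < b.1) || (!decide (b.1 < a.1) && decide (a.2 < b.2)))
      = (fun (a b : Int × Int) => decide ((toLex (a.1, a.2) : Lex (Int × Int)) < toLex (b.1, b.2))) := by
    funext a b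
    by_cases h1 : a.1 < b.1 <;> by_cases h2 : b.1 < a.1 <;> by_cases h3 : a.2 < b.2 <;>
      simp [Prod.Lex.lt_iff, h1, h2, h3] <;> omega
  simp [PySem.List.sorted2, hfun]

-- the append-and-count loop is enumerate
theorem pvEnumFold (l : List (Int × Int)) :
    ∀ (acc : List (Int × Int × Int)) (n : Int),
      l.foldl (fun st q => (st.1 ++ [(q.1, q.2, st.2)], st.2 + 1)) (acc, n)
        = (acc ++ (PySem.List.enumerate l n).map (fun p => (p.2.1, p.2.2, p.1)), n + l.length) := by
  induction l with
  | nil => intro acc n; simp [PySem.List.enumerate]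
  | cons q l ih =>
    intro acc n
    simp only [List.foldl_cons, PySem.List.enumerate_cons, List.map_cons, ih, Prod.mk.injEq,
      List.length_cons]
    constructor
    · simp
    · push_cast; ring

-- A's second pass is the flat triple-building fold over the regrouped stream
theorem pvA_second (ks : List Int) (P : Int → List Int) (st0 : List (Int × Int × Int) × Int) :
    ks.foldl (fun st ann => (P ann).foldl (fun st pos => (st.1 ++ [(ann, pos, st.2)], st.2 + 1)) st) st0
      = (ks.flatMap (fun a => (P a).map (fun p => (a, p)))).foldl
          (fun st q => (st.1 ++ [(q.1, q.2, st.2)], st.2 + 1)) st0 := by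
  simp only [List.foldl_flatMap, List.foldl_map]

theorem pvMain (data : List (List (String × List Int))) :
    create_annotator_mapping data = create_annotator_mapping_alt data := by
  simp only [create_annotator_mapping, create_annotator_mapping_alt]
  rw [pvA_first, pvB_first]
  set L := pvPairsOf data with hL
  set prL := PySem.Set.ofList L with hprL
  set d := L.foldl (fun d q => d.modify q.1 PySem.Set.empty (fun s => PySem.Set.add s q.2))
      PySem.Dict.empty with hd
  have hinv : ∀ a, d.getD a PySem.Set.empty
      = (prL.filter (fun q => q.1 == a)).map (fun q => q.2) := by
    intro a
    rw [hd, hprL, show PySem.Set.ofList L = L.foldl PySem.Set.add PySem.Set.empty from rfl]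
    exact pvInv L PySem.Dict.empty PySem.Set.empty (fun b => by simp [PySem.Dict.getD_empty]) a
  have hkeys : d.keys = PySem.Set.ofList (L.map (fun q => q.1)) := pvKeys L
  set ks := PySem.List.sorted (PySem.Set.ofList (L.map (fun q => q.1))) (fun x => x) false with hks
  have hknodup : ks.Nodup :=
    ((PySem.List.sorted_perm _ _ _).symm).nodup (PySem.Set.nodup_ofList _)
  have hklt : ks.Pairwise (· < ·) := PySem.List.sorted_ofList_pairwise_lt _
  have hprnodup : prL.Nodup := PySem.Set.nodup_ofList L
  have hgroupeq : ∀ a, ((prL.filter (fun q => q.1 == a)).map (fun q => q.2)).map (fun p => (a, p))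
      = prL.filter (fun q => q.1 == a) := by
    intro a
    rw [List.map_map]
    conv_rhs => rw [← List.map_id (prL.filter (fun q => q.1 == a))]
    refine List.map_congr_left ?_
    intro q hq
    have hq1 : q.1 = a := by simpa using List.of_mem_filter hq
    simp [← hq1]
  set LA := ks.flatMap (fun a =>
      (PySem.List.sorted (d.getD a PySem.Set.empty) (fun x => x) false).map (fun p => (a, p)))
    with hLA
  have hperm : LA.Perm prL := by
    refine (pvFlatMapPerm ks _ (fun a => prL.filter (fun q => q.1 == a)) ?_).trans
      (pvGroupPerm ks hknodup prL ?_)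
    · intro a _
      have h1 : (d.getD a PySem.Set.empty).map (fun p => ((a, p) : Int × Int))
          = prL.filter (fun q => q.1 == a) := by rw [hinv a, hgroupeq a]
      show (List.map (fun p => (a, p))
          (PySem.List.sorted (d.getD a PySem.Set.empty) (fun x => x) false)).Perm
          (prL.filter (fun q => q.1 == a))
      rw [← h1]
      exact (PySem.List.sorted_perm _ _ _).map _
    · intro q hq
      have h1 : q ∈ L := (PySem.Set.mem_ofList L q).mp hq
      have h2 : q.1 ∈ L.map (fun q => q.1) := List.mem_map_of_mem h1
      exact (PySem.List.mem_sorted _ _ _ _).mpr ((PySem.Set.mem_ofList _ _).mpr h2)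
  have hlt : LA.Pairwise (fun x y => (toLex (x.1, x.2) : Lex (Int × Int)) < toLex (y.1, y.2)) := by
    rw [hLA, List.pairwise_flatMap]
    constructor
    · intro a _
      rw [List.pairwise_map]
      have hnda : (d.getD a PySem.Set.empty).Nodup := by
        rw [hinv a]; exact pvNodupGroup prL hprnodup a
      refine (pvSortedLt _ hnda).imp ?_
      intro p p' hpp'
      simp [Prod.Lex.lt_iff, hpp']
    · refine hklt.imp ?_
      intro a b hab x hx y hy
      obtain ⟨p, -, rfl⟩ := List.mem_map.mp hx
      obtain ⟨p', -, rfl⟩ := List.mem_map.mp hy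
      simp [Prod.Lex.lt_iff, hab]
  have hsorted : PySem.List.sorted2 prL (fun q => q.1) (fun q => q.2) false = LA := by
    rw [pv_sorted2_eq]
    exact PySem.List.sorted_eq_of_perm_of_pairwise_lt prL LA
      (fun q => (toLex (q.1, q.2) : Lex (Int × Int))) hperm hlt
  rw [hkeys, pvA_second ks
      (fun a => PySem.List.sorted (d.getD a PySem.Set.empty) (fun x => x) false)
      (([] : List (Int × Int × Int)), (0 : Int)), ← hLA, hsorted, pvEnumFold LA [] 0]
  simp

-- ===== VERDICT (by name: the statement is the Claim_ definition above) =====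
theorem create_annotator_mapping_spec : Claim_equal_create_annotator_mapping := by
  intro data _ _
  unfold Spec_create_annotator_mapping
  exact pvMain data
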